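-- pv_equiv track=rewrite | github.com/abduxr/All-about-DE | Python-Beginner-Exercise/Dict-Exercises/check_unique_values.py | check_unique_value
-- ===== SOURCE A (Python) =====
-- def check_unique_value(d):
--     a=[]
--     for i in d.values():
--         if i in a:
--             return False
--         else:
--             a.append(i)
--     return True
--
-- d={}
-- ===== SOURCE B (Python) =====
-- def check_unique_value(d):
--     vals = list(d.values())
--     return len(set(vals)) == len(vals)
-- ===== Notes on version B (the rewrite author's own statement) =====
-- stated objective: simpler
-- what changed: Replaces the incremental seen-list scan with early exit by a single cardinality comparison: len(set(values)) == len(values).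
import Mathlib
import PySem

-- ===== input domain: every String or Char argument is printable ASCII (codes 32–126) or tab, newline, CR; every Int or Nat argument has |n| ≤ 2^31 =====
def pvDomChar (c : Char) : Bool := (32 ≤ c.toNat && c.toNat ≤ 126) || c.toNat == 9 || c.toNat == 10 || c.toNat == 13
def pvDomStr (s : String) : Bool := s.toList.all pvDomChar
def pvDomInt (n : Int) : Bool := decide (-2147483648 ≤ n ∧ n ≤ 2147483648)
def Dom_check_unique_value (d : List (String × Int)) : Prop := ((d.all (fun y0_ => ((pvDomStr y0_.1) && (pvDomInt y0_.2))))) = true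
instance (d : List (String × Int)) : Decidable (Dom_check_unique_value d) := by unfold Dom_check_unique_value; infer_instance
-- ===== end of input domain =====

-- B replaces A's incremental seen-list scan by a single cardinality comparison len(set(vals)) == len(vals), a simpler one-liner (same observed cost).


-- ===== PORT A =====
-- loop of A: 'for i in d.values(): if i in a: return False; a.append(i)'
def cuLoop : List Int → List Int → Bool
  | [], _ => true
  | i :: rest, a => if a.contains i then false else cuLoop rest (a ++ [i])

def check_unique_value (d : List (String × Int)) : Bool :=
  cuLoop (PySem.Dict.ofList d).values []

-- ===== PORT B =====
-- B: len(set(vals)) == len(vals)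
def check_unique_value_alt (d : List (String × Int)) : Bool :=
  let vals := (PySem.Dict.ofList d).values
  (PySem.Set.ofList vals).length == vals.length

-- ===== PRECONDITION & SPEC =====
def Spec_check_unique_value (d : List (String × Int)) (out : Bool) : Prop := out = check_unique_value_alt d
instance (d : List (String × Int)) (out : Bool) : Decidable (Spec_check_unique_value d out) := by unfold Spec_check_unique_value; infer_instance

-- ===== CLAIM (what is proved, stated in full; the proofs are below) =====
def Claim_equal_check_unique_value : Prop := ∀ (d : List (String × Int)), Dom_check_unique_value d → Spec_check_unique_value d (check_unique_value d)

-- ===== LEMMAS AND PROOFS =====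

lemma cuLoop_key (vs a : List Int) (ha : a.Nodup) :
    cuLoop vs a = ((PySem.Set.update a vs).length == a.length + vs.length) := by
  induction vs generalizing a with
  | nil => simp [cuLoop, PySem.Set.update]
  | cons i rest ih =>
    rw [cuLoop, PySem.Set.update_cons]
    by_cases h : i ∈ a
    · have hc : a.contains i = true := by simpa using h
      have hadd : PySem.Set.add a i = a := by
        simp [PySem.Set.add, PySem.Set.contains, h]
      rw [hadd, if_pos hc]
      have hle : (PySem.Set.update a rest).length ≤ a.length + rest.length := by
        rw [PySem.Set.update_eq_append_filter]
        have h1 := List.length_filter_le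
          (fun y => !(PySem.Set.contains a y)) (PySem.Set.ofList rest)
        have h2 := PySem.Set.length_ofList_le (xs := rest)
        simp only [List.length_append]
        omega
      have : ¬ ((PySem.Set.update a rest).length = a.length + (rest.length + 1)) := by omega
      simp [this]
    · have hc : a.contains i = false := by simpa using h
      have hadd : PySem.Set.add a i = a ++ [i] := by
        simp [PySem.Set.add, PySem.Set.contains, h]
      rw [hadd, if_neg (by simp; exact h)]
      have hnd : (a ++ [i]).Nodup := by
        refine List.Nodup.append ha (List.nodup_singleton i) ?_
        intro x hx hxm
        simp only [List.mem_singleton] at hxm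
        exact h (by rwa [hxm] at hx)
      rw [ih (a ++ [i]) hnd]
      simp only [List.length_append, List.length_cons, List.length_nil]
      congr 1
      omega

-- ===== VERDICT (by name: the statement is the Claim_ definition above) =====
theorem check_unique_value_spec : Claim_equal_check_unique_value := by
  intro d _
  unfold Spec_check_unique_value check_unique_value check_unique_value_alt
  rw [cuLoop_key _ [] (by simp)]
  simp [PySem.Set.update_nil_left]
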